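-- pv_equiv track=rewrite | github.com/Auto-SK/Resume | fontawesome5/make-fontawesome5.py | make_cmdname
-- ===== SOURCE A (Python) =====
-- def make_cmdname(name):
--     cmdname = []
--     upper = False
--     for i, c in enumerate(name):
--         if c == "-":
--             upper = True
--             continue
--         if i == 0:
--             upper = True
--         if upper:
--             cmdname.append(c.upper())
--         else:
--             cmdname.append(c)
--         upper = False
--     return "".join(cmdname)
-- ===== SOURCE B (Python) =====
-- def make_cmdname(name):
--     return "".join(p[:1].upper() + p[1:] for p in name.split("-"))
-- ===== Notes on version B (the rewrite author's own statement) =====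
-- stated objective: simpler
-- what changed: Replaces A's char-by-char loop with a boolean 'uppercase next' flag by splitting the name on '-' and joining each segment with only its first character uppercased (p[:1].upper() + p[1:]).
import Mathlib
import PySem

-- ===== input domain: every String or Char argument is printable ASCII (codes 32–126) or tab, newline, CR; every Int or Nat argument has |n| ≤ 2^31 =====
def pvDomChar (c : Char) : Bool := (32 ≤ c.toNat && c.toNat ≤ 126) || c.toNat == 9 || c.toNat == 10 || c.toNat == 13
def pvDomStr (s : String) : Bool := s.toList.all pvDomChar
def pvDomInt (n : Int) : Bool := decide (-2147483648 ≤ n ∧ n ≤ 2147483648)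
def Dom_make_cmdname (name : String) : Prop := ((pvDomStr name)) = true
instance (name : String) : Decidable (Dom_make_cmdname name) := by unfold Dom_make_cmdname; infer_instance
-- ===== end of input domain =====

-- B replaces A's char-by-char loop with a 'uppercase next' flag by splitting on '-' and
-- uppercasing only each segment's first character (objective: simpler); same return value everywhere.

-- ===== PORT A =====
-- One iteration of A's loop: state = (cmdname, upper), input = (c, i) from enumerate
-- (List.zipIdx pairs are (value, index)); c.upper() on a single char = PySem.Chars.upperChar.
def pvStepA (s : List Char × Bool) (ci : Char × Nat) : List Char × Bool :=
  if ci.1 = '-' then (s.1, true)                         -- if c == "-": upper = True; continue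
  else
    let upper := if ci.2 = 0 then true else s.2          -- if i == 0: upper = True
    if upper then (s.1 ++ [PySem.Chars.upperChar ci.1], false)  -- cmdname.append(c.upper()); upper = False
    else (s.1 ++ [ci.1], false)                          -- cmdname.append(c); upper = False

def make_cmdname (name : String) : String :=
  String.ofList ((name.toList.zipIdx.foldl pvStepA ([], false)).1)   -- "".join(cmdname)

-- ===== PORT B =====
-- p[:1].upper() + p[1:]
def pvCapB (p : List Char) : List Char :=
  PySem.Chars.upper (PySem.Chars.slice p none (some 1)) ++ PySem.Chars.slice p (some 1) none

def make_cmdname_alt (name : String) : String :=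
  String.ofList (PySem.Chars.join [] ((PySem.Chars.splitOn name.toList ['-']).map pvCapB))
  -- "".join(... for p in name.split("-"))

-- ===== PRECONDITION & SPEC =====
def Spec_make_cmdname (name : String) (out : String) : Prop := out = make_cmdname_alt name
instance (name : String) (out : String) : Decidable (Spec_make_cmdname name out) := by unfold Spec_make_cmdname; infer_instance

-- ===== CLAIM (what is proved, stated in full; the proofs are below) =====
def Claim_equal_make_cmdname : Prop := ∀ (name : String), Dom_make_cmdname name → Spec_make_cmdname name (make_cmdname name)

-- ===== LEMMAS AND PROOFS =====

-- Clean state machine equivalent to A's loop: u = 'uppercase the next character'.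
def pvG : Bool → List Char → List Char
  | _, [] => []
  | u, c :: cs =>
    if c = '-' then pvG true cs
    else (if u then PySem.Chars.upperChar c else c) :: pvG false cs

-- Accumulator form of splitting on '-' (cur = current segment, reversed).
def pvAux : List Char → List Char → List (List Char)
  | cur, [] => [cur.reverse]
  | cur, c :: cs => if c = '-' then cur.reverse :: pvAux [] cs else pvAux (c :: cur) cs

theorem pvCapB_nil : pvCapB [] = [] := by decide

theorem pvCapB_cons (c : Char) (p : List Char) :
    pvCapB (c :: p) = PySem.Chars.upperChar c :: p := by
  unfold pvCapB
  simp only [PySem.Chars.slice]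
  rw [PySem.List.slice_to (c :: p) (by norm_num), PySem.List.slice_from (c :: p) (by norm_num)]
  simp [PySem.Chars.upper]

theorem pvCapB_append (xs : List Char) (c : Char) (h : xs ≠ []) :
    pvCapB (xs ++ [c]) = pvCapB xs ++ [c] := by
  cases xs with
  | nil => exact absurd rfl h
  | cons d ds => simp [pvCapB_cons]

theorem pvJoin_nil_cons (p : List Char) (rest : List (List Char)) :
    PySem.Chars.join [] (p :: rest) = p ++ PySem.Chars.join [] rest := by
  cases rest with
  | nil => simp [PySem.Chars.join_singleton, PySem.Chars.join_nil]
  | cons q r => rw [PySem.Chars.join_cons_cons]; simp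

theorem pvGo_eq : ∀ (fuel : Nat) (l cur : List Char) (acc : List (List Char)),
    l.length < fuel →
    PySem.Chars.splitOn.go ['-'] fuel l cur acc = acc.reverse ++ pvAux cur l := by
  intro fuel
  induction fuel with
  | zero => intro l cur acc h; omega
  | succ f ih =>
    intro l cur acc h
    cases l with
    | nil =>
      rw [PySem.Chars.splitOn.go.eq_def]
      simp [pvAux]
    | cons c rest =>
      rw [PySem.Chars.splitOn.go.eq_def]
      by_cases hc : c = '-'
      · subst hc
        have hrec := ih rest [] (cur.reverse :: acc) (by simp at h; omega)
        simp [List.isPrefixOf, hrec, pvAux]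
      · have hrec := ih rest (c :: cur) acc (by simp at h; omega)
        simp [List.isPrefixOf, hc, Ne.symm hc, hrec, pvAux]

theorem pvSplitOn_eq (l : List Char) :
    PySem.Chars.splitOn l ['-'] = pvAux [] l := by
  have := pvGo_eq (l.length + 1) l [] [] (by omega)
  simpa [PySem.Chars.splitOn] using this

theorem pvFoldA : ∀ (l : List Char) (k : Nat) (acc : List Char) (u : Bool), k ≠ 0 →
    (List.foldl pvStepA (acc, u) (l.zipIdx k)).1 = acc ++ pvG u l := by
  intro l
  induction l with
  | nil => intro k acc u _; simp [pvG]
  | cons c cs ih =>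
    intro k acc u hk
    rw [List.zipIdx_cons, List.foldl_cons]
    by_cases hc : c = '-'
    · subst hc
      rw [show pvStepA (acc, u) ('-', k) = (acc, true) from by simp [pvStepA]]
      rw [ih (k + 1) acc true k.succ_ne_zero]
      simp [pvG]
    · have hstep : pvStepA (acc, u) (c, k)
          = (acc ++ [if u then PySem.Chars.upperChar c else c], false) := by
        simp only [pvStepA, if_neg hc, if_neg hk]
        cases u <;> simp
      rw [hstep, ih (k + 1) _ false k.succ_ne_zero]
      cases u <;> simp [pvG, hc]

theorem pvA_eq (l : List Char) :
    (List.foldl pvStepA ([], false) l.zipIdx).1 = pvG true l := by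
  cases l with
  | nil => simp [pvG]
  | cons c cs =>
    rw [List.zipIdx_cons, List.foldl_cons]
    by_cases hc : c = '-'
    · subst hc
      rw [show pvStepA ([], false) ('-', 0) = ([], true) from by simp [pvStepA]]
      rw [pvFoldA cs (0 + 1) [] true (by omega)]
      simp [pvG]
    · rw [show pvStepA ([], false) (c, 0) = ([PySem.Chars.upperChar c], false) from by
        simp [pvStepA, hc]]
      rw [pvFoldA cs (0 + 1) _ false (by omega)]
      simp [pvG, hc]

theorem pvJoinMap (cs : List Char) : ∀ (cur : List Char),
    PySem.Chars.join [] ((pvAux cur cs).map pvCapB)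
      = pvCapB cur.reverse ++ pvG cur.isEmpty cs := by
  induction cs with
  | nil => intro cur; simp [pvAux, PySem.Chars.join_singleton, pvG]
  | cons c rest ih =>
    intro cur
    by_cases hc : c = '-'
    · subst hc
      rw [show pvAux cur ('-' :: rest) = cur.reverse :: pvAux [] rest from by simp [pvAux]]
      rw [List.map_cons, pvJoin_nil_cons, ih []]
      simp [pvG, pvCapB_nil]
    · simp only [pvAux, if_neg hc]
      rw [ih (c :: cur)]
      cases cur with
      | nil => simp [pvCapB_cons, pvCapB_nil, pvG, hc]
      | cons d ds =>
        rw [show (c :: d :: ds).reverse = (d :: ds).reverse ++ [c] from by simp]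
        rw [pvCapB_append _ c (by simp)]
        simp [pvG, hc]

-- ===== VERDICT (by name: the statement is the Claim_ definition above) =====
theorem make_cmdname_spec : Claim_equal_make_cmdname := by
  intro name _
  unfold Spec_make_cmdname make_cmdname make_cmdname_alt
  rw [pvA_eq, pvSplitOn_eq, pvJoinMap]
  simp [pvCapB_nil]
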